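-- pv_equiv track=rewrite | github.com/juanbacan/django_core_app | core/utils.py | looks_like_icon_class
-- ===== SOURCE A (Python) =====
-- ICON_PREFIXES = ("fa-", "fa ", "fas ", "far ", "fal ",
--                  "bi-", "mdi-", "icon-")
--
-- def looks_like_icon_class(s: str) -> bool:
--     """
--     Devuelve True si la cadena parece ser una clase CSS de icono.
--     """
--     if not s or not isinstance(s, str):
--         return False
--     # (1) Empieza por algún prefijo definido
--     if s.startswith(ICON_PREFIXES):
--         return True
--     # (2) Contiene ' fa-' (dos clases separadas) u otro prefijo en medio
--     for p in ICON_PREFIXES: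
--         if f" {p}" in s:
--             return True
--     return False
-- ===== SOURCE B (Python) =====
-- ICON_PREFIXES = ("fa-", "fa ", "fas ", "far ", "fal ",
--                  "bi-", "mdi-", "icon-")
--
-- def looks_like_icon_class(s: str) -> bool:
--     """
--     Devuelve True si la cadena parece ser una clase CSS de icono.
--     """
--     if not s or not isinstance(s, str):
--         return False
--     # single left-to-right pass: test the prefixes only at word starts
--     # (position 0 or right after a space), instead of one substring
--     # search per prefix.
--     at_word_start = True
--     for i in range(len(s)):
--         if at_word_start and any(s.startswith(p, i) for p in ICON_PREFIXES):
--             return True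
--         at_word_start = s[i] == ' '
--     return False
-- ===== Notes on version B (the rewrite author's own statement) =====
-- stated objective: alternative
-- what changed: Instead of startswith on the whole string plus one substring search per prefix, B makes a single left-to-right pass over the string and tests the prefixes only at word starts (index 0 or just after a space).
import Mathlib
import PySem

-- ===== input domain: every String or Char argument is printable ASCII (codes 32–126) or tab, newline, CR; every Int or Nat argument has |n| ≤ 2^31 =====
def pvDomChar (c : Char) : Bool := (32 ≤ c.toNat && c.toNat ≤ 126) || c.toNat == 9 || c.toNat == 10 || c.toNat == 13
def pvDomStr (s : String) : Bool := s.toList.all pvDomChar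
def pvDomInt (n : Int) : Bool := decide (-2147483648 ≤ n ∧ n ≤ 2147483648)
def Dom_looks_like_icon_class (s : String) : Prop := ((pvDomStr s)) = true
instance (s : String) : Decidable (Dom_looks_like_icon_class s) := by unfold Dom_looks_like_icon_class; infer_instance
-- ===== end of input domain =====

-- B replaces A's per-prefix substring searches by one left-to-right pass that tests
-- the prefixes only at word starts (objective: alternative, same cost class).

def ICON_PREFIXES : List String :=
  ["fa-", "fa ", "fas ", "far ", "fal ", "bi-", "mdi-", "icon-"]

-- ===== PORT A =====
def looks_like_icon_class (s : String) : Bool :=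
  if s = "" then false
  else if ICON_PREFIXES.any (fun p => PySem.Str.startswith s p) then true
  else ICON_PREFIXES.any (fun p => PySem.Str.isIn (" " ++ p) s)

-- ===== PORT B =====
-- any(s.startswith(p, i) for p in ICON_PREFIXES) at suffix l of the string
def pvAnyPrefAt (l : List Char) : Bool :=
  ICON_PREFIXES.any (fun p => p.toList.isPrefixOf l)

-- the 'for i in range(len(s))' loop with the at_word_start flag
def pvScan : List Char → Bool → Bool
  | [], _ => false
  | c :: rest, atStart =>
      if atStart && pvAnyPrefAt (c :: rest) then true
      else pvScan rest (c == ' ')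

def looks_like_icon_class_alt (s : String) : Bool :=
  if s = "" then false
  else pvScan s.toList true

-- ===== PRECONDITION & SPEC =====
def Spec_looks_like_icon_class (s : String) (out : Bool) : Prop := out = looks_like_icon_class_alt s
instance (s : String) (out : Bool) : Decidable (Spec_looks_like_icon_class s out) := by unfold Spec_looks_like_icon_class; infer_instance

-- ===== CLAIM (what is proved, stated in full; the proofs are below) =====
def Claim_equal_looks_like_icon_class : Prop := ∀ (s : String), Dom_looks_like_icon_class s → Spec_looks_like_icon_class s (looks_like_icon_class s)

-- ===== LEMMAS AND PROOFS =====

theorem pvBoolEq {a b : Bool} (h : a = true ↔ b = true) : a = b := by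
  cases a <;> cases b <;> simp_all

theorem pvScan_eq (cs : List Char) (b : Bool) :
    pvScan cs b =
      ((b && pvAnyPrefAt cs) ||
        ICON_PREFIXES.any (fun p => decide ((' ' :: p.toList) <:+: cs))) := by
  induction cs generalizing b with
  | nil => simp [pvScan, pvAnyPrefAt, ICON_PREFIXES]
  | cons c rest ih =>
      rw [pvScan, ih]
      by_cases hb : (b && pvAnyPrefAt (c :: rest)) = true
      · simp [hb]
      · rw [Bool.eq_false_iff.2 hb]
        simp only [Bool.false_eq_true, if_false, Bool.false_or]
        apply pvBoolEq
        have hinf : ∀ p : String,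
            ((' ' :: p.toList) <:+: (c :: rest)) ↔
              ((c = ' ' ∧ p.toList <+: rest) ∨ (' ' :: p.toList) <:+: rest) := by
          intro p
          rw [List.infix_cons_iff, List.cons_prefix_cons]
          tauto
        simp only [List.any_eq_true, decide_eq_true_eq, Bool.or_eq_true, Bool.and_eq_true,
          beq_iff_eq, pvAnyPrefAt, List.any_eq_true, List.isPrefixOf_iff_prefix, hinf]
        aesop

theorem pvAnyPref_eq (s : String) :
    pvAnyPrefAt s.toList =
      ICON_PREFIXES.any (fun p => PySem.Chars.startswith s.toList p.toList) := by
  apply pvBoolEq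
  simp [pvAnyPrefAt, List.any_eq_true, List.isPrefixOf_iff_prefix, PySem.Chars.startswith_iff]

theorem pvMid_eq (s : String) :
    (ICON_PREFIXES.any (fun p => PySem.Chars.isIn (" " ++ p).toList s.toList)) =
      ICON_PREFIXES.any (fun p => decide ((' ' :: p.toList) <:+: s.toList)) := by
  apply pvBoolEq
  simp [List.any_eq_true, PySem.Chars.isIn_iff_infix]

theorem looks_like_icon_class_spec : Claim_equal_looks_like_icon_class := by
  intro s _
  unfold Spec_looks_like_icon_class looks_like_icon_class looks_like_icon_class_alt
  by_cases hs : s = ""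
  · simp [hs]
  · simp only [if_neg hs, PySem.Str.startswith_eq, PySem.Str.isIn_eq]
    rw [pvScan_eq, Bool.true_and, pvAnyPref_eq, pvMid_eq]
    cases h : ICON_PREFIXES.any (fun p => PySem.Chars.startswith s.toList p.toList)
    · simp
    · simp
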